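-- pv_equiv track=rewrite | github.com/vinupalackal/mcp_web_client | backend/main.py | _find_matching_tool_names
-- ===== SOURCE A (Python) =====
-- from typing import Any, List, Optional, Dict, Callable
--
-- def _find_matching_tool_names(
--     candidate_names: List[str],
--     available_tool_names: List[str],
-- ) -> List[str]:
--     resolved: List[str] = []
--     available_set = set(available_tool_names)
--
--     for candidate_name in candidate_names:
--         if candidate_name in available_set and candidate_name not in resolved:
--             resolved.append(candidate_name)
--
--         for available_tool_name in available_tool_names:
--             bare_name = available_tool_name.split("__", 1)[-1]
--             if bare_name == candidate_name and available_tool_name not in resolved: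
--                 resolved.append(available_tool_name)
--
--     return resolved
-- ===== SOURCE B (Python) =====
-- from typing import List
--
--
-- def _find_matching_tool_names(
--     candidate_names: List[str],
--     available_tool_names: List[str],
-- ) -> List[str]:
--     available_set = set(available_tool_names)
--     bare_map = {}
--     for name in available_tool_names:
--         bare_map.setdefault(name.split("__", 1)[-1], []).append(name)
--
--     resolved: List[str] = []
--     seen = set()
--     for candidate_name in candidate_names:
--         if candidate_name in available_set and candidate_name not in seen:
--             seen.add(candidate_name)
--             resolved.append(candidate_name)
--         for name in bare_map.get(candidate_name, []):
--             if name not in seen: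
--                 seen.add(name)
--                 resolved.append(name)
--     return resolved
-- ===== Notes on version B (the rewrite author's own statement) =====
-- stated objective: faster
-- what changed: B precomputes one dict from bare suffix to the ordered list of available tool names and tracks resolved names in a set, so each candidate is resolved by one dict lookup instead of rescanning all available names and the resolved list.
import Mathlib
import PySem

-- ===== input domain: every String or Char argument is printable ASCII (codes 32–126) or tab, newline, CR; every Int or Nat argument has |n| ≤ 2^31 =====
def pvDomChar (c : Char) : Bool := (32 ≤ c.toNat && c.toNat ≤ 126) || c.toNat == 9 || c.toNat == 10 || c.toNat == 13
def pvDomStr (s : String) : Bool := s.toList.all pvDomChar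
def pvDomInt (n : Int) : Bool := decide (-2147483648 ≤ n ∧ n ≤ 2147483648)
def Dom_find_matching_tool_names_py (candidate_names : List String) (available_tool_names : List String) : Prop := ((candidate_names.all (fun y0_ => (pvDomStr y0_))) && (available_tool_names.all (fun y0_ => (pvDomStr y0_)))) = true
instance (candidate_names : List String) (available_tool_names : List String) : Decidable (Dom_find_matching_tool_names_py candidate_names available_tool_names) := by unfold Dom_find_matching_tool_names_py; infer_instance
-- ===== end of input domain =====

-- B replaces A's per-candidate rescan of the available list (and list-membership tests on the
-- growing resolved list) by a precomputed bare-suffix → names dict plus a resolved set; faster.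

-- shared helper: name.split("__", 1)[-1] (splitMax? is Python's split with maxsplit;
-- pyGetD · (-1) is the [-1] index; split's result is never empty, so the default is dead)
def pvBareOf (s : String) : String :=
  PySem.List.pyGetD ((PySem.Str.splitMax? s "__" 1).getD []) (-1) ""

-- ===== PORT A =====
def find_matching_tool_names_py (candidate_names : List String) (available_tool_names : List String) : List String :=
  let available_set : PySem.Set String := PySem.Set.ofList available_tool_names
  candidate_names.foldl (fun resolved candidate_name =>
    let resolved :=
      if available_set.contains candidate_name && !(resolved.contains candidate_name) then
        resolved ++ [candidate_name]
      else resolved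
    available_tool_names.foldl (fun resolved available_tool_name =>
      let bare_name := pvBareOf available_tool_name
      if bare_name == candidate_name && !(resolved.contains available_tool_name) then
        resolved ++ [available_tool_name]
      else resolved) resolved) []

-- ===== PORT B =====
def find_matching_tool_names_py_alt (candidate_names : List String) (available_tool_names : List String) : List String :=
  let available_set : PySem.Set String := PySem.Set.ofList available_tool_names
  let bare_map : PySem.Dict String (List String) :=
    available_tool_names.foldl
      (fun m name => m.insert (pvBareOf name) (m.getD (pvBareOf name) [] ++ [name]))
      PySem.Dict.empty
  (candidate_names.foldl (fun st candidate_name =>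
      let st :=
        if available_set.contains candidate_name && !(st.2.contains candidate_name) then
          (st.1 ++ [candidate_name], st.2.add candidate_name)
        else st
      (bare_map.getD candidate_name []).foldl
        (fun st name =>
          if !(st.2.contains name) then (st.1 ++ [name], st.2.add name) else st)
        st)
    ([], PySem.Set.empty)).1

-- ===== PRECONDITION & SPEC =====
def Spec_find_matching_tool_names_py (candidate_names : List String) (available_tool_names : List String) (out : List String) : Prop := out = find_matching_tool_names_py_alt candidate_names available_tool_names
instance (candidate_names : List String) (available_tool_names : List String) (out : List String) : Decidable (Spec_find_matching_tool_names_py candidate_names available_tool_names out) := by unfold Spec_find_matching_tool_names_py; infer_instance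

-- ===== CLAIM (what is proved, stated in full; the proofs are below) =====
def Claim_equal_find_matching_tool_names_py : Prop := ∀ (candidate_names : List String) (available_tool_names : List String), Dom_find_matching_tool_names_py candidate_names available_tool_names → Spec_find_matching_tool_names_py candidate_names available_tool_names (find_matching_tool_names_py candidate_names available_tool_names)

-- ===== LEMMAS AND PROOFS =====

-- the bare_map built by B holds, at key c, exactly the available names whose bare name is c, in order
lemma pv_bareMap_getD (l : List String) (m : PySem.Dict String (List String)) (c : String) :
    (l.foldl (fun m name => m.insert (pvBareOf name) (m.getD (pvBareOf name) [] ++ [name])) m).getD c []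
      = m.getD c [] ++ l.filter (fun n => pvBareOf n == c) := by
  induction l generalizing m with
  | nil => simp
  | cons n t ih =>
    simp only [List.foldl_cons, List.filter_cons]
    rw [ih]
    by_cases h : pvBareOf n = c
    · simp [h]
    · simp [PySem.Dict.getD_insert, h, Ne.symm h]

-- A's inner scan of all available names is the same fold over just the matching ones
lemma pv_innerA_filter (l res : List String) (c : String) :
    l.foldl (fun r n => if pvBareOf n == c && !(r.contains n) then r ++ [n] else r) res
      = (l.filter (fun n => pvBareOf n == c)).foldl
          (fun r n => if !(r.contains n) then r ++ [n] else r) res := by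
  rw [List.foldl_filter]
  congr 1
  funext r n
  by_cases h : pvBareOf n == c
  · simp [h]
  · simp [h]

-- B's dedup fold with a side set computes A's list-membership dedup fold, and the set
-- keeps tracking exactly the members of the list
lemma pv_innerB (l : List String) : ∀ (res : List String) (seen : PySem.Set String),
    (∀ x, x ∈ seen ↔ x ∈ res) →
    (l.foldl (fun st n => if !(st.2.contains n) then (st.1 ++ [n], st.2.add n) else st)
        (res, seen)).1
      = l.foldl (fun r n => if !(r.contains n) then r ++ [n] else r) res
    ∧ ∀ x,
        x ∈ (l.foldl (fun st n => if !(st.2.contains n) then (st.1 ++ [n], st.2.add n) else st)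
              (res, seen)).2
          ↔ x ∈ l.foldl (fun r n => if !(r.contains n) then r ++ [n] else r) res := by
  induction l with
  | nil => intro res seen hinv; exact ⟨rfl, hinv⟩
  | cons n t ih =>
    intro res seen hinv
    simp only [List.foldl_cons]
    by_cases hn : n ∈ seen
    · have h1 : seen.contains n = true := (PySem.Set.contains_iff seen n).mpr hn
      have h2 : res.contains n = true := by
        simpa using (hinv n).mp hn
      simp only [h1, h2, Bool.not_true, Bool.false_eq_true, if_false]
      exact ih res seen hinv
    · have h1 : seen.contains n = false := by
        by_contra h
        exact hn ((PySem.Set.contains_iff seen n).mp (by simpa using h))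
      have h2 : res.contains n = false := by
        by_contra h
        exact hn ((hinv n).mpr (by simpa using h))
      simp only [h1, h2, Bool.not_false, if_true]
      refine ih (res ++ [n]) (seen.add n) ?_
      intro x
      rw [PySem.Set.mem_add]
      simp [hinv x]

-- outer loop: B's candidate fold (with the set) equals A's candidate fold
lemma pv_outer (avail : List String) (cands : List String) : ∀ (res : List String) (seen : PySem.Set String),
    (∀ x, x ∈ seen ↔ x ∈ res) →
    (cands.foldl (fun st c =>
        ((avail.foldl
            (fun m name => m.insert (pvBareOf name) (m.getD (pvBareOf name) [] ++ [name]))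
            PySem.Dict.empty).getD c []).foldl
          (fun st name => if !(st.2.contains name) then (st.1 ++ [name], st.2.add name) else st)
          (if (PySem.Set.ofList avail).contains c && !(st.2.contains c) then
            (st.1 ++ [c], st.2.add c)
          else st))
      (res, seen)).1
      = cands.foldl (fun resolved c =>
          avail.foldl (fun r n =>
            if pvBareOf n == c && !(r.contains n) then r ++ [n] else r)
          (if (PySem.Set.ofList avail).contains c && !(resolved.contains c) then
            resolved ++ [c]
          else resolved)) res := by
  induction cands with
  | nil => intro res seen _; rfl
  | cons c t ih =>
    intro res seen hinv
    simp only [List.foldl_cons]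
    have hmap : ((avail.foldl
        (fun m name => m.insert (pvBareOf name) (m.getD (pvBareOf name) [] ++ [name]))
        PySem.Dict.empty).getD c []) = avail.filter (fun n => pvBareOf n == c) := by
      rw [pv_bareMap_getD]; simp [pysem]
    rw [hmap, pv_innerA_filter]
    by_cases hc : c ∈ seen
    · have h1 : seen.contains c = true := (PySem.Set.contains_iff seen c).mpr hc
      have h2 : res.contains c = true := by simpa using (hinv c).mp hc
      rw [h1, h2]
      simp only [Bool.not_true, Bool.and_false, Bool.false_eq_true, if_false]
      obtain ⟨he, hi⟩ := pv_innerB (avail.filter (fun n => pvBareOf n == c)) res seen hinv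
      have htail := ih _ _ hi
      rw [← he, Prod.mk.eta] at htail
      rw [htail, he]
    · have h1 : seen.contains c = false := by
        by_contra h
        exact hc ((PySem.Set.contains_iff seen c).mp (by simpa using h))
      have h2 : res.contains c = false := by
        by_contra h
        exact hc ((hinv c).mpr (by simpa using h))
      rw [h1, h2]
      simp only [Bool.not_false, Bool.and_true]
      by_cases ha : (PySem.Set.ofList avail).contains c = true
      · rw [ha]
        simp only [if_true]
        have hinv' : ∀ x, x ∈ seen.add c ↔ x ∈ res ++ [c] := by
          intro x; rw [PySem.Set.mem_add]; simp [hinv x]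
        obtain ⟨he, hi⟩ := pv_innerB (avail.filter (fun n => pvBareOf n == c)) (res ++ [c])
          (seen.add c) hinv'
        have htail := ih _ _ hi
        rw [← he, Prod.mk.eta] at htail
        rw [htail, he]
      · rw [Bool.not_eq_true] at ha
        rw [ha]
        simp only [Bool.false_eq_true, if_false]
        obtain ⟨he, hi⟩ := pv_innerB (avail.filter (fun n => pvBareOf n == c)) res seen hinv
        have htail := ih _ _ hi
        rw [← he, Prod.mk.eta] at htail
        rw [htail, he]

-- ===== VERDICT (by name: the statement is the Claim_ definition above) =====
theorem find_matching_tool_names_py_spec : Claim_equal_find_matching_tool_names_py := by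
  intro cands avail _
  unfold Spec_find_matching_tool_names_py
  unfold find_matching_tool_names_py find_matching_tool_names_py_alt
  exact (pv_outer avail cands [] PySem.Set.empty (by intro x; simp [PySem.Set.empty])).symm
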